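-- pv_equiv track=rewrite | github.com/hammond022/yt-dlp-clipper | main.py | parse_video_line
-- ===== SOURCE A (Python) =====
-- def parse_video_line(line):
--     # Example: url start=00:00:05 end=00:00:15 quality=720p subs=on lang=English
--     parts = line.strip().split()
--     url = parts[0]
--     opts = {
--         "url": url,
--         "start": None,
--         "end": None,
--         "quality": "1080p",
--         "subs": "on",
--         "lang": "Automatic"
--     }
--     for part in parts[1:]:
--         if part.startswith("start="):
--             opts["start"] = part.split("=", 1)[1]
--         elif part.startswith("end="):
--             opts["end"] = part.split("=", 1)[1]
--         elif part.startswith("quality="):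
--             q = part.split("=", 1)[1]
--             if q in ("720p", "1080p"):
--                 opts["quality"] = q
--         elif part.startswith("subs="):
--             s = part.split("=", 1)[1].lower()
--             if s in ("on", "off"):
--                 opts["subs"] = s
--         elif part.startswith("lang="):
--             l = part.split("=", 1)[1]
--             if l in ("Filipino", "English", "Both", "Automatic"):
--                 opts["lang"] = l
--     return opts
-- ===== SOURCE B (Python) =====
-- def parse_video_line(line):
--     parts = line.strip().split()
--     rest = parts[1:]
--
--     def pick(key, default, allowed=None, lower=False):
--         prefix = key + "="
--         for tok in reversed(rest):
--             if tok.startswith(prefix):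
--                 v = tok[len(prefix):]
--                 if lower:
--                     v = v.lower()
--                 if allowed is None or v in allowed:
--                     return v
--         return default
--
--     return {
--         "url": parts[0],
--         "start": pick("start", None),
--         "end": pick("end", None),
--         "quality": pick("quality", "1080p", ("720p", "1080p")),
--         "subs": pick("subs", "on", ("on", "off"), lower=True),
--         "lang": pick("lang", "Automatic", ("Filipino", "English", "Both", "Automatic")),
--     }
-- ===== Notes on version B (the rewrite author's own statement) =====
-- stated objective: alternative
-- what changed: A's single forward fold over the tokens mutating a dict via an if/elif chain is replaced by five independent scans of the token list in reverse, one per option, each returning the first (i.e. last-in-order) valid assignment it meets or the default, the result dict being built in one literal.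
import Mathlib
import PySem

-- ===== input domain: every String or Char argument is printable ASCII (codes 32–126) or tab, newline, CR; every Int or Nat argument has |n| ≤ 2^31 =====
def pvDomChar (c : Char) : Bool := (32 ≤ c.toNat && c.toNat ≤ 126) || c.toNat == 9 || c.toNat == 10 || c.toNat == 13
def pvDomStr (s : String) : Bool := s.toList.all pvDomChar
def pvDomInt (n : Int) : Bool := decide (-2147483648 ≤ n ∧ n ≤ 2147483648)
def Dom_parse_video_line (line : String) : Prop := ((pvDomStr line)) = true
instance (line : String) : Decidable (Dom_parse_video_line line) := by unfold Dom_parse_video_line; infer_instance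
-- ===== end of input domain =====

-- B replaces A's single forward fold over a mutated dict by five independent reverse scans,
-- one per option key, each returning the first valid assignment met (= last in order).

-- ===== PORT A =====

-- the initial opts dict literal of A
def pvInitA (url : String) : PySem.Dict String (Option String) :=
  (((((PySem.Dict.empty.insert "url" (some url)).insert "start" none).insert "end"
      none).insert "quality" (some "1080p")).insert "subs" (some "on")).insert "lang"
      (some "Automatic")

-- one iteration of A's for-loop; part.split("=",1)[1] is the pyGet? at 1 (the none branch is
-- Python's IndexError, unreachable under the startswith guard)
def pvStepA (opts : PySem.Dict String (Option String)) (part : String) :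
    PySem.Dict String (Option String) :=
  if PySem.Str.startswith part "start=" then
    match PySem.List.pyGet? ((PySem.Str.splitMax? part "=" 1).getD []) 1 with
    | some v => opts.insert "start" (some v)
    | none => opts
  else if PySem.Str.startswith part "end=" then
    match PySem.List.pyGet? ((PySem.Str.splitMax? part "=" 1).getD []) 1 with
    | some v => opts.insert "end" (some v)
    | none => opts
  else if PySem.Str.startswith part "quality=" then
    match PySem.List.pyGet? ((PySem.Str.splitMax? part "=" 1).getD []) 1 with
    | some q => if ["720p", "1080p"].contains q then opts.insert "quality" (some q) else opts
    | none => opts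
  else if PySem.Str.startswith part "subs=" then
    match PySem.List.pyGet? ((PySem.Str.splitMax? part "=" 1).getD []) 1 with
    | some s0 =>
        let s := PySem.Str.lower s0
        if ["on", "off"].contains s then opts.insert "subs" (some s) else opts
    | none => opts
  else if PySem.Str.startswith part "lang=" then
    match PySem.List.pyGet? ((PySem.Str.splitMax? part "=" 1).getD []) 1 with
    | some l =>
        if ["Filipino", "English", "Both", "Automatic"].contains l then
          opts.insert "lang" (some l)
        else opts
    | none => opts
  else opts

def parse_video_line (line : String) : List (String × Option String) :=
  let parts := PySem.Str.split₀ (PySem.Str.strip line)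
  let url := (PySem.List.pyGet? parts 0).getD ""   -- parts[0]; IndexError when parts = [] (excluded by Pre_)
  ((PySem.List.slice parts (some 1) none).foldl pvStepA (pvInitA url)).items

-- ===== PORT B =====

-- B's helper pick: scan the (already reversed) token list, return the first valid assignment
-- for this key, else the default; v = tok[len(prefix):] is Str.slice
def pvPick (toks : List String) (pre : String) (allowed : Option (List String))
    (lower : Bool) (dflt : Option String) : Option String :=
  match toks with
  | [] => dflt
  | tok :: rest =>
    if PySem.Str.startswith tok pre then
      let v0 := PySem.Str.slice tok (some (PySem.Str.len pre)) none
      let v := if lower then PySem.Str.lower v0 else v0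
      if allowed.isNone || (allowed.getD []).contains v then some v
      else pvPick rest pre allowed lower dflt
    else pvPick rest pre allowed lower dflt

def parse_video_line_alt (line : String) : List (String × Option String) :=
  let parts := PySem.Str.split₀ (PySem.Str.strip line)
  let rest := PySem.List.slice parts (some 1) none
  let rrev := rest.reverse      -- reversed(rest)
  [("url", some ((PySem.List.pyGet? parts 0).getD "")),
   ("start", pvPick rrev "start=" none false none),
   ("end", pvPick rrev "end=" none false none),
   ("quality", pvPick rrev "quality=" (some ["720p", "1080p"]) false (some "1080p")),
   ("subs", pvPick rrev "subs=" (some ["on", "off"]) true (some "on")),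
   ("lang", pvPick rrev "lang=" (some ["Filipino", "English", "Both", "Automatic"]) false
      (some "Automatic"))]

-- ===== PRECONDITION & SPEC =====

-- Pre_ excludes exactly the lines that are empty after whitespace splitting, on which
-- parts[0] raises IndexError in both Pythons.
def Pre_parse_video_line (line : String) : Prop :=
  PySem.Str.split₀ (PySem.Str.strip line) ≠ []
instance (line : String) : Decidable (Pre_parse_video_line line) := by
  unfold Pre_parse_video_line; infer_instance

def pvWitness_parse_video_line : String := "url start=00:01 subs=ON lang=Both"

def Spec_parse_video_line (line : String) (out : List (String × Option String)) : Prop :=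
  out = parse_video_line_alt line
instance (line : String) (out : List (String × Option String)) :
    Decidable (Spec_parse_video_line line out) := by unfold Spec_parse_video_line; infer_instance

-- ===== CLAIM (what is proved, stated in full; the proofs are below) =====
def Claim_equal_parse_video_line : Prop := ∀ (line : String), Dom_parse_video_line line →
  Pre_parse_video_line line → Spec_parse_video_line line (parse_video_line line)

-- ===== LEMMAS AND PROOFS =====

-- proof-side: the effect of one token on ONE field (pvPick's per-token test, cur as fallback)
def pvU (pre : String) (allowed : Option (List String)) (lower : Bool)
    (cur : Option String) (tok : String) : Option String :=
  if PySem.Str.startswith tok pre then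
    let v0 := PySem.Str.slice tok (some (PySem.Str.len pre)) none
    let v := if lower then PySem.Str.lower v0 else v0
    if allowed.isNone || (allowed.getD []).contains v then some v else cur
  else cur

-- proof-side: A's dict in its stable six-entry shape
def pvDict (u a b c d e : Option String) : PySem.Dict String (Option String) :=
  PySem.Dict.mk [("url", u), ("start", a), ("end", b), ("quality", c), ("subs", d), ("lang", e)]

lemma pv_init (url : String) :
    pvInitA url = pvDict (some url) none none (some "1080p") (some "on") (some "Automatic") := rfl

-- pvPick over xs ++ [tok] first scans xs, falling back to processing tok
lemma pv_pick_append (pre : String) (allowed : Option (List String)) (lower : Bool) :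
    ∀ (xs : List String) (tok : String) (d : Option String),
    pvPick (xs ++ [tok]) pre allowed lower d = pvPick xs pre allowed lower (pvU pre allowed lower d tok) := by
  intro xs
  induction xs with
  | nil => intro tok d; simp [pvPick, pvU]
  | cons x t ih =>
    intro tok d
    simp only [List.cons_append, pvPick]
    rw [ih]

-- the forward last-valid-wins fold is pvPick on the reversed list
lemma pv_foldl_pick (pre : String) (allowed : Option (List String)) (lower : Bool) :
    ∀ (l : List String) (d : Option String),
    l.foldl (pvU pre allowed lower) d = pvPick l.reverse pre allowed lower d := by
  intro l
  induction l with
  | nil => intro d; simp [pvPick]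
  | cons x t ih =>
    intro d
    simp only [List.foldl_cons, List.reverse_cons]
    rw [ih, pv_pick_append]

-- ---- splitting machinery for A's split("=", 1) and the startswith tests ----

lemma pv_go_all (l : List Char) : ∀ (fuel m : Nat) (cur : List Char) (acc : List (List Char)),
    '=' ∉ l → l.length ≤ fuel →
    PySem.Chars.splitOnMax.go ['='] fuel m l cur acc = ((cur.reverse ++ l) :: acc).reverse := by
  induction l with
  | nil =>
    intro fuel m cur acc _ _
    cases fuel <;> simp [PySem.Chars.splitOnMax.go]
  | cons c rest ih =>
    intro fuel m cur acc hm hf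
    cases fuel with
    | zero => simp at hf
    | succ f =>
      have hc : ¬ ('=' = c) := fun h => hm (by simp [← h])
      have hpre : (['='] : List Char).isPrefixOf (c :: rest) = false := by
        simp [List.isPrefixOf]; exact hc
      by_cases hm0 : m = 0
      · subst hm0; rw [PySem.Chars.splitOnMax.go.eq_def]; simp
      · rw [PySem.Chars.splitOnMax.go.eq_def]
        simp only [hpre, hm0, if_false]
        rw [ih f m (c :: cur) acc (fun h => hm (List.mem_cons_of_mem _ h))
          (by simp at hf; omega)]
        simp

lemma pv_go_zero : ∀ (fuel : Nat) (l : List Char) (acc : List (List Char)),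
    PySem.Chars.splitOnMax.go ['='] fuel 0 l [] acc = (l :: acc).reverse := by
  intro fuel l acc
  cases fuel <;> cases l <;> simp [PySem.Chars.splitOnMax.go]

lemma pv_go_found (k : List Char) : ∀ (fuel : Nat) (rest cur : List Char)
    (acc : List (List Char)), '=' ∉ k → k.length < fuel →
    PySem.Chars.splitOnMax.go ['='] fuel 1 (k ++ '=' :: rest) cur acc =
      acc.reverse ++ [cur.reverse ++ k, rest] := by
  induction k with
  | nil =>
    intro fuel rest cur acc _ hf
    cases fuel with
    | zero => simp at hf
    | succ f =>
      rw [PySem.Chars.splitOnMax.go.eq_def]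
      simp [List.isPrefixOf, pv_go_zero]
  | cons c k' ih =>
    intro fuel rest cur acc hm hf
    cases fuel with
    | zero => simp at hf
    | succ f =>
      have hc : ¬ ('=' = c) := fun h => hm (by simp [← h])
      have hpre : (['='] : List Char).isPrefixOf (c :: (k' ++ '=' :: rest)) = false := by
        simp [List.isPrefixOf]; exact hc
      rw [PySem.Chars.splitOnMax.go.eq_def]
      simp only [List.cons_append, hpre]
      rw [if_neg (by norm_num), ih f rest (c :: cur) acc
        (fun h => hm (List.mem_cons_of_mem _ h)) (by simp at hf ⊢; omega)]
      simp

lemma pv_split_no (s : List Char) (h : '=' ∉ s) :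
    PySem.Chars.splitOnMax s ['='] 1 = [s] := by
  unfold PySem.Chars.splitOnMax
  rw [if_neg (by norm_num), pv_go_all s (s.length + 1) _ [] [] h (by omega)]
  simp

lemma pv_split_yes (k rest : List Char) (h : '=' ∉ k) :
    PySem.Chars.splitOnMax (k ++ '=' :: rest) ['='] 1 = [k, rest] := by
  unfold PySem.Chars.splitOnMax
  rw [if_neg (by norm_num), show Int.toNat 1 = 1 from rfl,
    pv_go_found k _ rest [] [] h (by simp)]
  simp

lemma pv_decomp (l : List Char) (h : '=' ∈ l) :
    ∃ k rest, l = k ++ '=' :: rest ∧ '=' ∉ k := by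
  induction l with
  | nil => cases h
  | cons c t ih =>
    by_cases hc : c = '='
    · exact ⟨[], t, by simp [hc], by simp⟩
    · have hmt : '=' ∈ t := by
        rcases List.mem_cons.mp h with h' | h'
        · exact absurd h'.symm hc
        · exact h'
      obtain ⟨k, r, h1, h2⟩ := ih hmt
      exact ⟨c :: k, r, by simp [h1], by
        intro hmem
        rcases List.mem_cons.mp hmem with h' | h'
        · exact hc h'.symm
        · exact h2 h'⟩

lemma pv_prefix (k₁ : List Char) : ∀ (k rest : List Char), '=' ∉ k₁ → '=' ∉ k →
    ((k₁ ++ ['=']) <+: (k ++ '=' :: rest) ↔ k₁ = k) := by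
  induction k₁ with
  | nil =>
    intro k rest _ h
    cases k with
    | nil => simp
    | cons c k' =>
      have hc : ¬ ('=' = c) := fun h' => h (by simp [← h'])
      simp [List.cons_prefix_cons, hc]
  | cons a k₁' ih =>
    intro k rest h₁ h
    have ha : a ≠ '=' := fun h' => h₁ (by simp [h'])
    cases k with
    | nil => simp [List.cons_prefix_cons, ha]
    | cons c k' =>
      have ihs := ih k' rest (fun h' => h₁ (List.mem_cons_of_mem _ h'))
        (fun h' => h (List.mem_cons_of_mem _ h'))
      simp [List.cons_prefix_cons, ihs]

-- A's/B's startswith test on a token containing '=' is exactly a key comparison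
lemma pv_startswith (k₁ k rest : List Char) (h₁ : '=' ∉ k₁) (h : '=' ∉ k) :
    PySem.Chars.startswith (k ++ '=' :: rest) (k₁ ++ ['=']) = decide (k₁ = k) := by
  cases hd : decide (k₁ = k) with
  | false =>
    simp only [decide_eq_false_iff_not] at hd
    refine Bool.eq_false_iff.mpr (fun hT => hd ?_)
    exact (pv_prefix k₁ k rest h₁ h).mp ((PySem.Chars.startswith_iff _ _).mp hT)
  | true =>
    simp only [decide_eq_true_eq] at hd
    exact (PySem.Chars.startswith_iff _ _).mpr ((pv_prefix k₁ k rest h₁ h).mpr hd)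

-- a string is determined by its char list
lemma pv_str_ext (s t : String) (h : s.toList = t.toList) : s = t := by
  have := congrArg String.ofList h
  simpa using this

-- B's tok[len(prefix):] is a drop on the char list
lemma pv_slice_drop (tok : String) (i : Int) (h : 0 <= i) :
    PySem.Str.slice tok (some i) none = String.ofList (tok.toList.drop i.toNat) := by
  apply pv_str_ext
  simp [pysem, PySem.List.slice_from _ h]

-- the heart: one step of A's chain updates the six fields independently, each by pvU
lemma pv_step (u a b c d e : Option String) (part : String) :
    pvStepA (pvDict u a b c d e) part =
    pvDict u (pvU "start=" none false a part) (pvU "end=" none false b part)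
      (pvU "quality=" (some ["720p", "1080p"]) false c part)
      (pvU "subs=" (some ["on", "off"]) true d part)
      (pvU "lang=" (some ["Filipino", "English", "Both", "Automatic"]) false e part) := by
  by_cases hm : '=' ∈ part.toList
  · obtain ⟨k, rest, hk, hkne⟩ := pv_decomp part.toList hm
    have hsplit : (PySem.Str.splitMax? part "=" 1).getD [] =
        [String.ofList k, String.ofList rest] := by
      simp [PySem.Str.splitMax?, PySem.Chars.splitMax?, hk, pv_split_yes k rest hkne]
    have hsw : ∀ (p : String) (k₁ : List Char), p.toList = k₁ ++ ['='] → '=' ∉ k₁ →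
        PySem.Str.startswith part p = decide (k₁ = k) := by
      intro p k₁ hp h₁
      rw [show PySem.Str.startswith part p
            = PySem.Chars.startswith part.toList p.toList from rfl, hk, hp]
      exact pv_startswith k₁ k rest h₁ hkne
    have hv : ∀ (p : String), p.toList = k ++ ['='] →
        PySem.Str.slice part (some (PySem.Str.len p)) none = String.ofList rest := by
      intro p hp
      have hlen : PySem.Str.len p = ((k.length + 1 : Nat) : Int) := by
        simp [pysem, hp]
      have h2 : part.toList = (k ++ ['=']) ++ rest := by simp [hk]
      rw [hlen, pv_slice_drop _ _ (by positivity), h2]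
      have h3 : ((k.length + 1 : Nat) : Int).toNat = (k ++ ['=']).length := by simp
      rw [h3, List.drop_left]
    unfold pvStepA pvU
    rw [hsplit,
        hsw "start=" "start".toList rfl (by decide),
        hsw "end=" "end".toList rfl (by decide),
        hsw "quality=" "quality".toList rfl (by decide),
        hsw "subs=" "subs".toList rfl (by decide),
        hsw "lang=" "lang".toList rfl (by decide)]
    by_cases h1 : k = "start".toList
    · subst h1
      rw [hv "start=" rfl]
      simp [pvDict, PySem.Dict.insert]
    · by_cases h2 : k = "end".toList
      · subst h2
        rw [hv "end=" rfl]
        simp [pvDict, PySem.Dict.insert]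
      · by_cases h3 : k = "quality".toList
        · subst h3
          rw [hv "quality=" rfl]
          simp [pvDict, PySem.Dict.insert]
          split_ifs <;> rfl
        · by_cases h4 : k = "subs".toList
          · subst h4
            rw [hv "subs=" rfl]
            simp [pvDict, PySem.Dict.insert]
            split_ifs <;> rfl
          · by_cases h5 : k = "lang".toList
            · subst h5
              rw [hv "lang=" rfl]
              simp [pvDict, PySem.Dict.insert]
              split_ifs <;> rfl
            · have m1 : (['s', 't', 'a', 'r', 't'] : List Char) ≠ k :=
                fun e => h1 (e.symm.trans (by decide))
              have m2 : (['e', 'n', 'd'] : List Char) ≠ k :=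
                fun e => h2 (e.symm.trans (by decide))
              have m3 : (['q', 'u', 'a', 'l', 'i', 't', 'y'] : List Char) ≠ k :=
                fun e => h3 (e.symm.trans (by decide))
              have m4 : (['s', 'u', 'b', 's'] : List Char) ≠ k :=
                fun e => h4 (e.symm.trans (by decide))
              have m5 : (['l', 'a', 'n', 'g'] : List Char) ≠ k :=
                fun e => h5 (e.symm.trans (by decide))
              simp [m1, m2, m3, m4, m5]
  · have hsplit : (PySem.Str.splitMax? part "=" 1).getD [] = [part] := by
      simp [PySem.Str.splitMax?, PySem.Chars.splitMax?, pv_split_no part.toList hm]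
    have hsw : ∀ p : String, '=' ∈ p.toList → PySem.Str.startswith part p = false := by
      intro p hp
      refine Bool.eq_false_iff.mpr (fun hT => ?_)
      exact hm (((PySem.Chars.startswith_iff _ _).mp hT).subset hp)
    unfold pvStepA pvU
    rw [hsplit, hsw "start=" (by decide), hsw "end=" (by decide),
        hsw "quality=" (by decide), hsw "subs=" (by decide), hsw "lang=" (by decide)]
    simp

-- the whole fold in field-wise form
lemma pv_fold (l : List String) : ∀ (u a b c d e : Option String),
    l.foldl pvStepA (pvDict u a b c d e) =
    pvDict u (l.foldl (pvU "start=" none false) a) (l.foldl (pvU "end=" none false) b)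
      (l.foldl (pvU "quality=" (some ["720p", "1080p"]) false) c)
      (l.foldl (pvU "subs=" (some ["on", "off"]) true) d)
      (l.foldl (pvU "lang=" (some ["Filipino", "English", "Both", "Automatic"]) false) e) := by
  induction l with
  | nil => intro u a b c d e; rfl
  | cons x t ih =>
    intro u a b c d e
    simp only [List.foldl_cons]
    rw [pv_step, ih]

-- ===== VERDICT (by name: the statement is the Claim_ definition above) =====
theorem parse_video_line_spec : Claim_equal_parse_video_line := by
  intro line _ _
  unfold Spec_parse_video_line parse_video_line parse_video_line_alt
  simp only [pv_init, pv_fold, pv_foldl_pick]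
  rfl
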